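-- pv_equiv track=rewrite | github.com/kkr010128/codebert | problem088/problem088_114.py | func
-- ===== SOURCE A (Python) =====
-- def func(A):
--   result = 0
--   min = 0
--   for a in A:
--     if a < min:
--       result += min - a
--     else:
--       min = a
--   return result
-- ===== SOURCE B (Python) =====
-- def func(A):
--   # two-pass: materialize the running-max-prefix table, then sum the drops
--   pre = [0]
--   for a in A:
--     pre.append(pre[-1] if a < pre[-1] else a)
--   return sum(m - a for m, a in zip(pre, A) if a < m)
-- ===== Notes on version B (the rewrite author's own statement) =====
-- stated objective: alternative
-- what changed: Replaces the fused single loop with a scalar running max by a two-pass decomposition: first materialize the running-maximum prefix table, then a separate zip-and-sum pass over (prefix-max, element) pairs.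
import Mathlib
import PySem

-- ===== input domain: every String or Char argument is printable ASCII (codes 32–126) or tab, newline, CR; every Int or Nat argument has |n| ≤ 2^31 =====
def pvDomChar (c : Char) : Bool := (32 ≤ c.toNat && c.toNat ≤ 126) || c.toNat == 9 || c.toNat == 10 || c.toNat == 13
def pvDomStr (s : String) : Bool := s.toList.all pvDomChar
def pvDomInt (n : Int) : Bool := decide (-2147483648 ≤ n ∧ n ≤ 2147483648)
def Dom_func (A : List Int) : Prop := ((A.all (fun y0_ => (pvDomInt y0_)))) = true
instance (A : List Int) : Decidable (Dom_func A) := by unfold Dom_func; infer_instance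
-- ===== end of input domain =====

-- B is an alternative same-cost decomposition: a materialized running-max prefix table plus a second summation pass, instead of A's fused loop.

-- ===== PORT A =====
def func (A : List Int) : Int :=
  (A.foldl (fun (st : Int × Int) a =>
    if a < st.2 then (st.1 + (st.2 - a), st.2) else (st.1, a)) (0, 0)).1

-- ===== PORT B =====
-- prefix table: pre[i] = running max of 0 and A[0..i-1] (built left to right as in Source B)
def preMax (m : Int) (A : List Int) : List Int :=
  match A with
  | [] => [m]
  | a :: rest => m :: preMax (if a < m then m else a) rest

def func_alt (A : List Int) : Int :=
  ((preMax 0 A).zip A).foldl (fun s p => if p.2 < p.1 then s + (p.1 - p.2) else s) 0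

-- ===== PRECONDITION & SPEC =====
def Spec_func (A : List Int) (out : Int) : Prop := out = func_alt A
instance (A : List Int) (out : Int) : Decidable (Spec_func A out) := by unfold Spec_func; infer_instance

-- ===== CLAIM (what is proved, stated in full; the proofs are below) =====
def Claim_equal_func : Prop := ∀ (A : List Int), Dom_func A → Spec_func A (func A)

-- ===== LEMMAS AND PROOFS =====
theorem func_loop_eq (A : List Int) : ∀ (r m : Int),
    (A.foldl (fun (st : Int × Int) a =>
      if a < st.2 then (st.1 + (st.2 - a), st.2) else (st.1, a)) (r, m)).1
    = ((preMax m A).zip A).foldl (fun s p => if p.2 < p.1 then s + (p.1 - p.2) else s) r := by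
  induction A with
  | nil => intro r m; simp [preMax]
  | cons a rest ih =>
    intro r m
    simp only [preMax, List.zip_cons_cons, List.foldl_cons]
    by_cases h : a < m
    · simp [h, ih]
    · simp [h, ih]

-- ===== VERDICT (by name: the statement is the Claim_ definition above) =====
theorem func_spec : Claim_equal_func := by
  intro A _
  unfold Spec_func func func_alt
  exact func_loop_eq A 0 0
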